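-- pv_equiv track=rewrite | github.com/research-project-studio/snowglobe | cli/src/webmap_archiver/templates/serve.py | _zxy_to_tile_id
-- ===== SOURCE A (Python) =====
-- def _zxy_to_tile_id(z: int, x: int, y: int) -> int:
--     """Convert z/x/y to Hilbert tile ID."""
--     if z == 0:
--         return 0
--
--     # Calculate base offset for zoom level
--     acc = 0
--     for i in range(z):
--         acc += (1 << i) * (1 << i)
--
--     # Hilbert curve position within zoom level
--     n = 1 << z
--     rx = ry = s = 0
--     d = 0
--     s = n // 2
--     while s > 0:
--         rx = 1 if (x & s) > 0 else 0
--         ry = 1 if (y & s) > 0 else 0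
--         d += s * s * ((3 * rx) ^ ry)
--
--         # Rotate
--         if ry == 0:
--             if rx == 1:
--                 x = s - 1 - x
--                 y = s - 1 - y
--             x, y = y, x
--         s //= 2
--
--     return acc + d
-- ===== SOURCE B (Python) =====
-- def _zxy_to_tile_id(z: int, x: int, y: int) -> int:
--     """Convert z/x/y to Hilbert tile ID."""
--     # zoom-level base offset: sum of 4**i for i < z, in closed form
--     offset = ((1 << (2 * z)) - 1) // 3
--     # Hilbert index as a state machine over the bits of x, y (no coordinate
--     # mutation): state = (swap, complement-x, complement-y); digits by Horner.
--     sw = cx = cy = False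
--     d = 0
--     for i in reversed(range(z)):
--         a = (((x >> i) & 1) == 1) != cx
--         b = (((y >> i) & 1) == 1) != cy
--         if sw:
--             a, b = b, a
--         d = 4 * d + ((3 if a else 0) ^ (1 if b else 0))
--         if not b:
--             sw = not sw
--             if a:
--                 cx = not cx
--                 cy = not cy
--     return offset + d
-- ===== Notes on version B (the rewrite author's own statement) =====
-- stated objective: alternative
-- what changed: A mutates and rotates the coordinates each iteration (reflect s-1-x, swap x,y) and sums s*s terms plus a loop-computed base offset; B never touches the coordinates: it runs a finite-state machine (swap/complement-x/complement-y state) over the original bits of x and y top-down, accumulates the Hilbert digits by Horner's rule d = 4*d + digit, and gets the base offset from the closed form ((1<<(2*z))-1)//3.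
import Mathlib
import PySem

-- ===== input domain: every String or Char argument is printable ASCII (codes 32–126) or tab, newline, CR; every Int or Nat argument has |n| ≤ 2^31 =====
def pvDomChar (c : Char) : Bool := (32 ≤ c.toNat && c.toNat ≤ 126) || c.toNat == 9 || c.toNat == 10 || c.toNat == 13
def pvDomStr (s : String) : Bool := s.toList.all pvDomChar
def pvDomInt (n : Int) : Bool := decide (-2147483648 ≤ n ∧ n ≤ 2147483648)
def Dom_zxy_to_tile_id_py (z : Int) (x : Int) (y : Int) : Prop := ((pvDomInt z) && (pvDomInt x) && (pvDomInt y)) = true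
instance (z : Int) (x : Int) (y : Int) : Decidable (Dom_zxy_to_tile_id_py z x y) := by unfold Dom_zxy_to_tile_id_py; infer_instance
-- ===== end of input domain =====

-- B replaces A's coordinate-mutating Hilbert loop by a state machine over the original
-- bits of x and y (swap/complement state, Horner digit accumulation) and the offset
-- loop by the closed form ((1 << (2*z)) - 1) // 3; same return value (alternative).

-- Python `1 << k` for a nonnegative shift count k (the only shifts A performs inside Pre_)
def pvShl1 (k : Nat) : Int := 1 <<< k

-- ===== PORT A =====

-- the `while s > 0` loop of A, step for step; state (x, y, d), recursing on s //= 2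
def pvHilbA (x y d s : Int) : Int :=
  if h : 0 < s then
    let rx : Int := if 0 < PySem.Int.band x s then 1 else 0
    let ry : Int := if 0 < PySem.Int.band y s then 1 else 0
    let d' := d + s * s * (PySem.Int.bxor (3 * rx) ry)
    if ry = 0 then
      if rx = 1 then
        pvHilbA (s - 1 - y) (s - 1 - x) d' (PySem.Int.floordiv s 2)
      else
        pvHilbA y x d' (PySem.Int.floordiv s 2)
    else
      pvHilbA x y d' (PySem.Int.floordiv s 2)
  else d
termination_by s.toNat
decreasing_by
  all_goals rw [PySem.Int.floordiv_eq_ediv_of_pos (by omega : (0:Int) < 2)]; omega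

def zxy_to_tile_id_py (z : Int) (x : Int) (y : Int) : Int :=
  if z = 0 then 0
  else
    let acc := (PySem.List.pyRange 0 z 1).foldl
      (fun acc i => acc + pvShl1 i.toNat * pvShl1 i.toNat) 0
    let n : Int := pvShl1 z.toNat
    acc + pvHilbA x y 0 (PySem.Int.floordiv n 2)

-- ===== PORT B =====

-- one iteration of Source B's `for i in reversed(range(z))` loop;
-- state (sw, cx, cy, d); i ≥ 0 inside the loop, so Python's `x >> i` is `x >>> i.toNat`
def pvStepB (x y : Int) (st : Bool × Bool × Bool × Int) (i : Int) : Bool × Bool × Bool × Int :=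
  let a0 := (PySem.Int.band (x >>> i.toNat) 1 == 1) != st.2.1
  let b0 := (PySem.Int.band (y >>> i.toNat) 1 == 1) != st.2.2.1
  let a := if st.1 then b0 else a0
  let b := if st.1 then a0 else b0
  let d' := 4 * st.2.2.2 + PySem.Int.bxor (if a then 3 else 0) (if b then 1 else 0)
  if !b then
    if a then (!st.1, !st.2.1, !st.2.2.1, d')
    else (!st.1, st.2.1, st.2.2.1, d')
  else (st.1, st.2.1, st.2.2.1, d')

def zxy_to_tile_id_py_alt (z : Int) (x : Int) (y : Int) : Int :=
  let offset := PySem.Int.floordiv (((1 : Int) <<< (2 * z).toNat) - 1) 3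
  let st := ((PySem.List.pyRange 0 z 1).reverse).foldl (pvStepB x y) (false, false, false, 0)
  offset + st.2.2.2

-- ===== PRECONDITION & SPEC =====
-- A raises ValueError ("negative shift count") for z < 0, so Pre_ excludes exactly z < 0.
def Pre_zxy_to_tile_id_py (z : Int) (x : Int) (y : Int) : Prop := 0 ≤ z
instance (z : Int) (x : Int) (y : Int) : Decidable (Pre_zxy_to_tile_id_py z x y) := by
  unfold Pre_zxy_to_tile_id_py; infer_instance

def pvWitness_zxy_to_tile_id_py : Int × Int × Int := (2, 1, 1)

def Spec_zxy_to_tile_id_py (z : Int) (x : Int) (y : Int) (out : Int) : Prop := out = zxy_to_tile_id_py_alt z x y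
instance (z : Int) (x : Int) (y : Int) (out : Int) : Decidable (Spec_zxy_to_tile_id_py z x y out) := by unfold Spec_zxy_to_tile_id_py; infer_instance

-- ===== CLAIM (what is proved, stated in full; the proofs are below) =====
def Claim_equal_zxy_to_tile_id_py : Prop := ∀ (z : Int) (x : Int) (y : Int), Dom_zxy_to_tile_id_py z x y → Pre_zxy_to_tile_id_py z x y → Spec_zxy_to_tile_id_py z x y (zxy_to_tile_id_py z x y)

-- ===== LEMMAS AND PROOFS =====

theorem pvShl1_eq (k : Nat) : pvShl1 k = 2 ^ k := by
  unfold pvShl1; exact (Int.shiftLeft_eq 1 k).trans (by ring)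

-- bit k of v, as the integer (v / 2^k) % 2 ∈ {0, 1}
def pvBit (v : Int) (k : Nat) : Int := v / 2 ^ k % 2

theorem pvBit01 (v : Int) (k : Nat) : pvBit v k = 0 ∨ pvBit v k = 1 := by
  unfold pvBit; omega

theorem pv_div_eq {b q r a : Int} (hb : 0 < b) (h0 : 0 ≤ r) (h1 : r < b) (h : a = b * q + r) :
    a / b = q ∧ a % b = r :=
  (Int.ediv_emod_unique hb).mpr ⟨by rw [h]; ring, h0, h1⟩

theorem pv_mod_eq (M a b t : Int) (h : a = b + t * M) : a % M = b % M := by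
  rw [h, mul_comm, Int.add_mul_emod_self_left]

theorem pv_pow_toNat (k : Nat) : ((2:Int) ^ k).toNat = 2 ^ k := by
  rw [show ((2:Int)^k) = ((2^k : Nat) : Int) by push_cast; ring, Int.toNat_natCast]

theorem pv_cast_bit (n k : Nat) : pvBit (n : Int) k = ((n / 2^k % 2 : Nat) : Int) := by
  unfold pvBit
  rw [Int.natCast_emod, Int.natCast_ediv]
  push_cast
  ring_nf

-- `v & 2^k` in terms of pvBit (Python-exact also for negative v)
theorem pv_band_pow (v : Int) (k : Nat) : PySem.Int.band v (2 ^ k) = pvBit v k * 2 ^ k := by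
  have hp : (0:Int) < 2^k := by positivity
  by_cases hv : 0 ≤ v
  · obtain ⟨n, rfl⟩ : ∃ n : Nat, v = (n : Int) := ⟨v.toNat, (Int.toNat_of_nonneg hv).symm⟩
    rw [PySem.Int.band_of_nonneg hv hp.le, pv_pow_toNat, Int.toNat_natCast, Nat.and_two_pow,
      Nat.testBit_eq_decide_div_mod_eq, pv_cast_bit]
    by_cases h : n / 2^k % 2 = 1
    · simp [h]
    · have h0 : n / 2^k % 2 = 0 := by omega
      simp [h, h0]
  · unfold PySem.Int.band
    rw [if_neg hv, if_pos hp.le, pv_pow_toNat]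
    set m : Nat := (-v - 1).toNat with hm
    have hvm : v = -((m:Int) + 1) := by omega
    rw [Nat.two_pow_and, Nat.testBit_eq_decide_div_mod_eq]
    set t : Nat := m / 2^k with ht
    set r : Nat := m % 2^k with hr
    have hmr : (m:Int) = 2^k * t + r := by
      exact_mod_cast (Nat.div_add_mod m (2^k)).symm
    have hr0 : (0:Int) ≤ (r:Int) := by positivity
    have hr1 : (r:Int) < 2^k := by
      have : r < 2^k := Nat.mod_lt _ (by positivity)
      exact_mod_cast this
    have hdiv : v / 2^k = -((t:Int)+1) :=
      (pv_div_eq hp (by omega : (0:Int) ≤ 2^k - 1 - (r:Int)) (by omega : (2:Int)^k - 1 - (r:Int) < 2^k)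
        (by rw [hvm, hmr]; ring1)).1
    unfold pvBit
    rw [hdiv]
    have hbit : (decide (t % 2 = 1)).toNat = t % 2 := by
      by_cases hb : t % 2 = 1 <;> simp [hb] <;> omega
    rw [hbit]
    rcases (by omega : t % 2 = 0 ∨ t % 2 = 1) with h|h
    · rw [h]
      have h2 : (-((t:Int)+1)) % 2 = 1 := by omega
      rw [h2]
      simp
    · rw [h]
      have h2 : (-((t:Int)+1)) % 2 = 0 := by omega
      rw [h2]
      simp

-- A's 0/1 indicator in terms of pvBit
theorem pv_rx (X : Int) (k : Nat) :
    (if 0 < PySem.Int.band X (2^k) then (1:Int) else 0) = pvBit X k := by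
  rcases pvBit01 X k with h|h
  · rw [pv_band_pow, h, zero_mul, if_neg (lt_irrefl 0)]
  · rw [pv_band_pow, h, one_mul, if_pos (by positivity : (0:Int) < 2^k)]

-- B's raw bit test equals pvBit
theorem pv_band_shift (v : Int) (k : Nat) : PySem.Int.band (v >>> k) 1 = pvBit v k := by
  rw [PySem.Int.band_one, PySem.Int.mod_eq_emod_of_pos (by omega), Int.shiftRight_eq_div_pow]
  unfold pvBit
  norm_num

-- bit k of the (k+1)-bit complement
theorem pv_bit_comp (x : Int) (k : Nat) : pvBit (2 ^ (k + 1) - 1 - x) k = 1 - pvBit x k := by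
  have hp : (0:Int) < 2^k := by positivity
  have h0 : 0 ≤ x % 2^k := Int.emod_nonneg x hp.ne'
  have h1 : x % 2^k < 2^k := Int.emod_lt_of_pos x hp
  have hx : 2^k * (x / 2^k) + x % 2^k = x := Int.ediv_add_emod x (2^k)
  have hdiv : (2^(k+1) - 1 - x) / 2^k = 1 - x / 2^k :=
    (pv_div_eq hp (by omega : (0:Int) ≤ 2^k - 1 - x % 2^k)
      (by omega : (2:Int)^k - 1 - x % 2^k < 2^k)
      (by linear_combination hx)).1
  unfold pvBit
  rw [hdiv]
  omega

-- pvBit only looks at v modulo 2^(k+1)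
theorem pv_bit_congr (v w : Int) (k : Nat) (h : v % 2 ^ (k + 1) = w % 2 ^ (k + 1)) :
    pvBit v k = pvBit w k := by
  have key : ∀ u : Int, pvBit u k = pvBit (u % 2 ^ (k+1)) k := by
    intro u
    unfold pvBit
    conv_lhs => rw [← Int.emod_add_ediv u (2^(k+1))]
    rw [show (2:Int)^(k+1) * (u / 2^(k+1)) = 2^k * (2 * (u / 2^(k+1))) by ring,
      Int.add_mul_ediv_left _ _ (by positivity : ((2:Int)^k) ≠ 0),
      Int.add_mul_emod_self_left]
  rw [key v, key w, h]

theorem pv_mod_down (v w : Int) (k : Nat) (h : v % 2 ^ (k + 1) = w % 2 ^ (k + 1)) :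
    v % 2 ^ k = w % 2 ^ k := by
  have hd : ((2:Int)^k) ∣ 2^(k+1) := pow_dvd_pow 2 (by omega)
  rw [← Int.emod_emod_of_dvd v hd, ← Int.emod_emod_of_dvd w hd, h]

theorem pvHilbA_zero (a b d : Int) : pvHilbA a b d 0 = d := by
  rw [pvHilbA]; norm_num

theorem pv_half (k : Nat) : PySem.Int.floordiv ((2:Int) ^ (k + 1)) 2 = 2 ^ k := by
  rw [PySem.Int.floordiv_eq_ediv_of_pos (by omega : (0:Int) < 2), pow_succ,
    Int.mul_ediv_cancel _ (by omega)]

-- one unfolding of A's loop at s = 2^k, with the branch tests phrased via pvBit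
theorem pvHilbA_step (k : Nat) (X Y d : Int) :
    pvHilbA X Y d (2 ^ k) =
      (if pvBit Y k = 0 then
        (if pvBit X k = 1 then
          pvHilbA (2^k - 1 - Y) (2^k - 1 - X)
            (d + 2^k * 2^k * PySem.Int.bxor (3 * pvBit X k) (pvBit Y k))
            (PySem.Int.floordiv (2^k) 2)
        else
          pvHilbA Y X
            (d + 2^k * 2^k * PySem.Int.bxor (3 * pvBit X k) (pvBit Y k))
            (PySem.Int.floordiv (2^k) 2))
      else
        pvHilbA X Y
          (d + 2^k * 2^k * PySem.Int.bxor (3 * pvBit X k) (pvBit Y k))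
          (PySem.Int.floordiv (2^k) 2)) := by
  rw [pvHilbA, dif_pos (by positivity : (0:Int) < 2^k)]
  simp only [pv_rx]

-- A's loop only looks at its coordinates modulo 2^(k+1)
theorem pvHilbA_congr : ∀ (k : Nat) (x x' y y' d : Int),
    x % 2 ^ (k + 1) = x' % 2 ^ (k + 1) → y % 2 ^ (k + 1) = y' % 2 ^ (k + 1) →
    pvHilbA x y d (2 ^ k) = pvHilbA x' y' d (2 ^ k) := by
  intro k
  induction k with
  | zero =>
      intro x x' y y' d h1 h2
      rw [pvHilbA_step, pvHilbA_step, pv_bit_congr x x' 0 h1, pv_bit_congr y y' 0 h2,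
        show PySem.Int.floordiv ((2:Int)^0) 2 = 0 by decide]
      simp only [pvHilbA_zero]
  | succ n ih =>
      intro x x' y y' d h1 h2
      have hx2 := pv_bit_congr x x' (n+1) h1
      have hy2 := pv_bit_congr y y' (n+1) h2
      have h1' : x % 2^(n+1) = x' % 2^(n+1) := pv_mod_down _ _ _ h1
      have h2' : y % 2^(n+1) = y' % 2^(n+1) := pv_mod_down _ _ _ h2
      rw [pvHilbA_step, pvHilbA_step, hx2, hy2, pv_half]
      split_ifs
      · exact ih _ _ _ _ _
          (by rw [Int.sub_emod, h2', ← Int.sub_emod])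
          (by rw [Int.sub_emod, h1', ← Int.sub_emod])
      · exact ih _ _ _ _ _ h2' h1'
      · exact ih _ _ _ _ _ h1' h2'

-- step decomposition: the bool state ignores d, and d enters affinely
theorem pvStepB_decomp (x y i : Int) (sw cx cy : Bool) (e : Int) :
    pvStepB x y (sw, cx, cy, e) i =
      ((pvStepB x y (sw, cx, cy, 0) i).1, (pvStepB x y (sw, cx, cy, 0) i).2.1,
       (pvStepB x y (sw, cx, cy, 0) i).2.2.1, 4 * e + (pvStepB x y (sw, cx, cy, 0) i).2.2.2) := by
  simp only [pvStepB]
  split_ifs <;> simp <;> ring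

theorem pv_fold_affine (x y : Int) : ∀ (l : List Int) (sw cx cy : Bool) (e : Int),
    l.foldl (pvStepB x y) (sw, cx, cy, e) =
      ((l.foldl (pvStepB x y) (sw, cx, cy, 0)).1,
       (l.foldl (pvStepB x y) (sw, cx, cy, 0)).2.1,
       (l.foldl (pvStepB x y) (sw, cx, cy, 0)).2.2.1,
       4 ^ l.length * e + (l.foldl (pvStepB x y) (sw, cx, cy, 0)).2.2.2) := by
  intro l
  induction l with
  | nil => intro sw cx cy e; simp
  | cons i t iht =>
      intro sw cx cy e
      rw [List.foldl_cons, List.foldl_cons, pvStepB_decomp]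
      rcases hstep : pvStepB x y (sw, cx, cy, 0) i with ⟨sw', cx', cy', q⟩
      rw [iht sw' cx' cy' (4*e+q), iht sw' cx' cy' q]
      simp only [List.length_cons, Prod.mk.injEq, true_and, and_true]
      ring

-- the transform B's state (sw, cx, cy) encodes, applied on c = 2^(k+1) bits
def pvTr (c : Int) (sw cx cy : Bool) (x y : Int) : Int × Int :=
  let a := if cx then c - 1 - x else x
  let b := if cy then c - 1 - y else y
  if sw then (b, a) else (a, b)

theorem pv_band_one_bit (v : Int) : PySem.Int.band v 1 = pvBit v 0 := by
  have := pv_band_shift v 0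
  simpa using this

theorem pv_bit_comp0 (x : Int) : pvBit (1 - x) 0 = 1 - pvBit x 0 := by
  have := pv_bit_comp x 0
  norm_num at this
  exact this

theorem pv_bx00 : PySem.Int.bxor 0 0 = 0 := by decide
theorem pv_bx01 : PySem.Int.bxor 0 1 = 1 := by decide
theorem pv_bx30 : PySem.Int.bxor 3 0 = 3 := by decide
theorem pv_bx31 : PySem.Int.bxor 3 1 = 2 := by decide
theorem pv_four (m : Nat) : (4:Int) ^ m = 2 ^ m * 2 ^ m := by
  rw [← mul_pow]; norm_num

-- one application of B's step, with the bit tests phrased via pvBit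
theorem pvStepB_eval (x y i : Int) (k : Nat) (hik : i.toNat = k) (sw cx cy : Bool) (e : Int) :
    pvStepB x y (sw, cx, cy, e) i =
      (let a0 := (pvBit x k == 1) != cx
       let b0 := (pvBit y k == 1) != cy
       let a := if sw then b0 else a0
       let b := if sw then a0 else b0
       let d' := 4 * e + PySem.Int.bxor (if a then 3 else 0) (if b then 1 else 0)
       if !b then if a then (!sw, !cx, !cy, d') else (!sw, cx, cy, d') else (sw, cx, cy, d')) := by
  simp only [pvStepB, hik, pv_band_shift]

-- MAIN: A's loop on the transformed coordinates = B's state-machine fold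
set_option maxHeartbeats 2000000 in
theorem pv_main : ∀ (k : Nat) (sw cx cy : Bool) (x y d : Int),
    pvHilbA (pvTr (2 ^ (k + 1)) sw cx cy x y).1 (pvTr (2 ^ (k + 1)) sw cx cy x y).2 d (2 ^ k)
      = d + (((PySem.List.pyRange 0 ((k : Int) + 1) 1).reverse).foldl (pvStepB x y)
          (sw, cx, cy, 0)).2.2.2 := by
  intro k
  induction k with
  | zero =>
      intro sw cx cy x y d
      have hl : (PySem.List.pyRange 0 (((0:Nat):Int) + 1) 1).reverse = [0] := by decide
      rw [hl, List.foldl_cons, List.foldl_nil, pvHilbA_step 0,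
        show PySem.Int.floordiv ((2:Int)^0) 2 = 0 by decide]
      simp only [pvHilbA_zero]
      rcases pvBit01 x 0 with hx|hx <;> rcases pvBit01 y 0 with hy|hy <;>
        cases sw <;> cases cx <;> cases cy <;>
        simp [pvTr, pvStepB, pv_band_shift, pv_band_one_bit, pv_bit_comp, pv_bit_comp0, hx, hy,
          pv_bx00, pv_bx01, pv_bx30, pv_bx31] <;> try ring
  | succ m ih =>
      intro sw cx cy x y d
      have ih' : ∀ (sw' cx' cy' : Bool) (X Y d' : Int),
          X % 2^(m+1) = (pvTr (2^(m+1)) sw' cx' cy' x y).1 % 2^(m+1) →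
          Y % 2^(m+1) = (pvTr (2^(m+1)) sw' cx' cy' x y).2 % 2^(m+1) →
          pvHilbA X Y d' (2^m)
            = d' + (((PySem.List.pyRange 0 ((m:Int)+1) 1).reverse).foldl (pvStepB x y)
                (sw',cx',cy',0)).2.2.2 := by
        intro sw' cx' cy' X Y d' h1 h2
        rw [pvHilbA_congr m X _ Y _ d' h1 h2]
        exact ih sw' cx' cy' x y d'
      have hlen : ((PySem.List.pyRange 0 ((m:Int)+1) 1).reverse).length = m + 1 := by
        rw [List.length_reverse, PySem.List.length_pyRange_one]
        omega
      have hsplit : (PySem.List.pyRange 0 (((m+1:Nat):Int)+1) 1).reverse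
          = ((m:Int)+1) :: (PySem.List.pyRange 0 ((m:Int)+1) 1).reverse := by
        rw [show (((m+1:Nat):Int)+1) = ((m:Int)+1)+1 by push_cast; ring,
          PySem.List.pyRange_one_succ_right (by positivity : (0:Int) ≤ (m:Int)+1),
          List.reverse_append]
        simp
      have htn : (((m:Int)+1)).toNat = m+1 := by omega
      rw [hsplit, List.foldl_cons, pvHilbA_step (m+1), pv_half m,
        pvStepB_eval x y ((m:Int)+1) (m+1) htn]
      generalize hL : (PySem.List.pyRange 0 ((m:Int)+1) 1).reverse = L
      have hlenL : L.length = m + 1 := by rw [← hL]; exact hlen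
      have ihL : ∀ (sw' cx' cy' : Bool) (X Y d' : Int),
          X % 2^(m+1) = (pvTr (2^(m+1)) sw' cx' cy' x y).1 % 2^(m+1) →
          Y % 2^(m+1) = (pvTr (2^(m+1)) sw' cx' cy' x y).2 % 2^(m+1) →
          pvHilbA X Y d' (2^m)
            = d' + (L.foldl (pvStepB x y) (sw',cx',cy',0)).2.2.2 := by
        intro sw' cx' cy' X Y d' h1 h2
        rw [← hL]
        exact ih' sw' cx' cy' X Y d' h1 h2
      rcases pvBit01 x (m+1) with hx|hx <;> rcases pvBit01 y (m+1) with hy|hy <;>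
        cases sw <;> cases cx <;> cases cy <;>
        (simp [pvTr, pv_bit_comp, hx, hy,
           pv_bx00, pv_bx01, pv_bx30, pv_bx31]
         rw [pv_fold_affine x y, hlenL]
         first
          | (rw [ihL false false false] <;>
              (first
                | (simp [pvTr]; done)
                | (simp [pvTr]; apply pv_mod_eq _ _ _ 0; ring1)
                | (simp [pvTr]; apply pv_mod_eq _ _ _ 1; ring1)
                | (simp [pvTr]; apply pv_mod_eq _ _ _ (-1); ring1)
                | (simp [pvTr]; apply pv_mod_eq _ _ _ 2; ring1)
                | (simp [pv_four]; done)
                | (simp [pv_four]; ring1)))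
          | (rw [ihL false false true] <;>
              (first
                | (simp [pvTr]; done)
                | (simp [pvTr]; apply pv_mod_eq _ _ _ 0; ring1)
                | (simp [pvTr]; apply pv_mod_eq _ _ _ 1; ring1)
                | (simp [pvTr]; apply pv_mod_eq _ _ _ (-1); ring1)
                | (simp [pvTr]; apply pv_mod_eq _ _ _ 2; ring1)
                | (simp [pv_four]; done)
                | (simp [pv_four]; ring1)))
          | (rw [ihL false true false] <;>
              (first
                | (simp [pvTr]; done)
                | (simp [pvTr]; apply pv_mod_eq _ _ _ 0; ring1)
                | (simp [pvTr]; apply pv_mod_eq _ _ _ 1; ring1)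
                | (simp [pvTr]; apply pv_mod_eq _ _ _ (-1); ring1)
                | (simp [pvTr]; apply pv_mod_eq _ _ _ 2; ring1)
                | (simp [pv_four]; done)
                | (simp [pv_four]; ring1)))
          | (rw [ihL false true true] <;>
              (first
                | (simp [pvTr]; done)
                | (simp [pvTr]; apply pv_mod_eq _ _ _ 0; ring1)
                | (simp [pvTr]; apply pv_mod_eq _ _ _ 1; ring1)
                | (simp [pvTr]; apply pv_mod_eq _ _ _ (-1); ring1)
                | (simp [pvTr]; apply pv_mod_eq _ _ _ 2; ring1)
                | (simp [pv_four]; done)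
                | (simp [pv_four]; ring1)))
          | (rw [ihL true false false] <;>
              (first
                | (simp [pvTr]; done)
                | (simp [pvTr]; apply pv_mod_eq _ _ _ 0; ring1)
                | (simp [pvTr]; apply pv_mod_eq _ _ _ 1; ring1)
                | (simp [pvTr]; apply pv_mod_eq _ _ _ (-1); ring1)
                | (simp [pvTr]; apply pv_mod_eq _ _ _ 2; ring1)
                | (simp [pv_four]; done)
                | (simp [pv_four]; ring1)))
          | (rw [ihL true false true] <;>
              (first
                | (simp [pvTr]; done)
                | (simp [pvTr]; apply pv_mod_eq _ _ _ 0; ring1)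
                | (simp [pvTr]; apply pv_mod_eq _ _ _ 1; ring1)
                | (simp [pvTr]; apply pv_mod_eq _ _ _ (-1); ring1)
                | (simp [pvTr]; apply pv_mod_eq _ _ _ 2; ring1)
                | (simp [pv_four]; done)
                | (simp [pv_four]; ring1)))
          | (rw [ihL true true false] <;>
              (first
                | (simp [pvTr]; done)
                | (simp [pvTr]; apply pv_mod_eq _ _ _ 0; ring1)
                | (simp [pvTr]; apply pv_mod_eq _ _ _ 1; ring1)
                | (simp [pvTr]; apply pv_mod_eq _ _ _ (-1); ring1)
                | (simp [pvTr]; apply pv_mod_eq _ _ _ 2; ring1)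
                | (simp [pv_four]; done)
                | (simp [pv_four]; ring1)))
          | (rw [ihL true true true] <;>
              (first
                | (simp [pvTr]; done)
                | (simp [pvTr]; apply pv_mod_eq _ _ _ 0; ring1)
                | (simp [pvTr]; apply pv_mod_eq _ _ _ 1; ring1)
                | (simp [pvTr]; apply pv_mod_eq _ _ _ (-1); ring1)
                | (simp [pvTr]; apply pv_mod_eq _ _ _ 2; ring1)
                | (simp [pv_four]; done)
                | (simp [pv_four]; ring1))))

-- A's accumulator: 3 * (sum of 4^i for i < k) = 4^k - 1
theorem pv_acc_mul_three (k : Nat) :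
    (3:Int) * ((PySem.List.pyRange 0 (k:Int) 1).foldl
      (fun acc i => acc + pvShl1 i.toNat * pvShl1 i.toNat) 0) = 4 ^ k - 1 := by
  induction k with
  | zero => simp [PySem.List.pyRange_one_eq_nil]
  | succ m ih =>
      rw [show ((m+1 : Nat) : Int) = (m : Int) + 1 by push_cast; ring,
        PySem.List.pyRange_one_succ_right (by positivity : (0:Int) ≤ (m:Int))]
      rw [List.foldl_append]
      simp only [List.foldl_cons, List.foldl_nil]
      rw [mul_add, ih, Int.toNat_natCast, pvShl1_eq]
      have h4 : ((2:Int) ^ m) * 2 ^ m = 4 ^ m := by rw [← mul_pow]; norm_num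
      rw [h4]; ring

theorem pv_floordiv_three (m : Int) : PySem.Int.floordiv (3 * m) 3 = m := by
  rw [PySem.Int.floordiv_eq_ediv_of_pos (by omega : (0:Int) < 3)]
  exact Int.mul_ediv_cancel_left m (by omega)

-- A's offset loop equals B's closed form
theorem pv_acc_eq_offset (k : Nat) :
    (PySem.List.pyRange 0 (k:Int) 1).foldl
      (fun acc i => acc + pvShl1 i.toNat * pvShl1 i.toNat) 0
    = PySem.Int.floordiv (((1:Int) <<< (2 * k)) - 1) 3 := by
  rw [show ((1:Int) <<< (2*k)) = pvShl1 (2*k) from rfl, pvShl1_eq, pow_mul,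
    show ((2:Int) ^ 2) = 4 by norm_num, ← pv_acc_mul_three k, pv_floordiv_three]

theorem pv_alt_zero (x y : Int) : zxy_to_tile_id_py_alt 0 x y = 0 := by
  unfold zxy_to_tile_id_py_alt
  rw [PySem.List.pyRange_one_eq_nil (le_refl (0:Int))]
  norm_num [PySem.Int.floordiv_eq_ediv_of_pos (by omega : (0:Int) < 3)]

-- ===== VERDICT (by name: the statement is the Claim_ definition above) =====
theorem zxy_to_tile_id_py_spec : Claim_equal_zxy_to_tile_id_py := by
  intro z x y _ hpre
  unfold Spec_zxy_to_tile_id_py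
  rcases eq_or_lt_of_le hpre with hz | hz
  · rw [← hz]
    unfold zxy_to_tile_id_py
    rw [if_pos rfl, pv_alt_zero]
  · obtain ⟨m, hm⟩ : ∃ m : Nat, z = (m : Int) + 1 := ⟨(z-1).toNat, by omega⟩
    subst hm
    unfold zxy_to_tile_id_py zxy_to_tile_id_py_alt
    rw [if_neg (by omega)]
    have hz2 : pvShl1 ((m:Int)+1).toNat = 2 ^ (m+1) := by
      rw [show (((m:Int)+1)).toNat = m+1 by omega, pvShl1_eq]
    have hs : PySem.Int.floordiv ((2:Int) ^ (m+1)) 2 = 2 ^ m := pv_half m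
    have hmain := pv_main m false false false x y 0
    simp only [pvTr, Bool.false_eq_true, if_false] at hmain
    have hcast : ((m:Int)+1) = ((m+1 : Nat) : Int) := by push_cast; ring
    simp only [hz2, hs]
    rw [hmain, zero_add, hcast, pv_acc_eq_offset (m+1),
      show (2 * ((m+1:Nat):Int)).toNat = 2 * (m+1) by omega]
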